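-- pv_equiv track=rewrite | github.com/automl/hierarchical_nas_construction | experiments/utils/dataset_generation/gen_language_data.py | overlap_filter
-- ===== SOURCE A (Python) =====
-- def overlap_filter(lang_dict):
--     lang_no_overlap = {}
--     for lang, words in lang_dict.items():
--         no_overlap = words
--         for other_lang in lang_dict.keys():
--             if other_lang != lang:
--                 no_overlap = no_overlap.difference(lang_dict[other_lang])
--         lang_no_overlap[lang] = no_overlap
--     return lang_no_overlap
-- ===== SOURCE B (Python) =====
-- def overlap_filter(lang_dict):
--     # One pass: count in how many languages each word occurs, keep count == 1.
--     counts = {}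
--     for words in lang_dict.values():
--         for w in words:
--             counts[w] = counts.get(w, 0) + 1
--     return {lang: {w for w in words if counts[w] == 1}
--             for lang, words in lang_dict.items()}
-- ===== Notes on version B (the rewrite author's own statement) =====
-- stated objective: faster
-- what changed: Replaces the quadratic per-language chain of set differences against every other language with a single global word->language-count dictionary built in one pass, then keeps per language exactly the words with count 1.
import Mathlib
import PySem

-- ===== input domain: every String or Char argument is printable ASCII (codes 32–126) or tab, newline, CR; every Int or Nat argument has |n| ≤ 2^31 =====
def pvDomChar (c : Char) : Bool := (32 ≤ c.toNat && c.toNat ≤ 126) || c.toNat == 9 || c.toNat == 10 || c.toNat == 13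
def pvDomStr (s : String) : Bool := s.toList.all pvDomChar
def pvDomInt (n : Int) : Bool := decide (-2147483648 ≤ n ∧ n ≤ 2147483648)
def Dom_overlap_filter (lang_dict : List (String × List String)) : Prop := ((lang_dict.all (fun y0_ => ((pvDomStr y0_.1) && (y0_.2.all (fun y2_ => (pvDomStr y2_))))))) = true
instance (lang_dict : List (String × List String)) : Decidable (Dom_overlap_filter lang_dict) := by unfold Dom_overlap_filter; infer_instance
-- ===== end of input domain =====

-- B replaces A's per-language chain of set differences against every other language
-- by one global word -> #languages count, keeping per language the words counted once (faster).

-- ===== PORT A =====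
-- 'lang_dict[other_lang]' is ported as getD with default []: exact here because
-- other_lang ranges over the dict's own keys, so the lookup never raises.
def overlap_filter (lang_dict : List (String × List String)) : List (String × List String) :=
  let d : PySem.Dict String (List String) := PySem.Dict.mk lang_dict
  (d.items.foldl (fun acc p =>
      acc.insert p.1
        (d.keys.foldl (fun no ol =>
            if ol ≠ p.1 then PySem.Set.diff no (d.getD ol []) else no) p.2))
    PySem.Dict.empty).items

-- ===== PORT B =====
-- 'counts[w]' is ported as getD with default 0: exact because w was counted.
def overlap_filter_alt (lang_dict : List (String × List String)) : List (String × List String) :=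
  let counts : PySem.Dict String Int :=
    lang_dict.foldl (fun c p => p.2.foldl (fun c w => c.modify w 0 (· + 1)) c) PySem.Dict.empty
  lang_dict.map (fun p => (p.1, p.2.filter (fun w => counts.getD w 0 == 1)))

-- ===== PRECONDITION & SPEC =====
-- Pre_ is the representation invariant of the Python argument dict[str, set[str]]:
-- distinct keys and duplicate-free value lists; it excludes no input a Python caller can pass.
def Pre_overlap_filter (lang_dict : List (String × List String)) : Prop :=
  (lang_dict.map Prod.fst).Nodup ∧ ∀ p ∈ lang_dict, p.2.Nodup
instance (lang_dict : List (String × List String)) : Decidable (Pre_overlap_filter lang_dict) := by unfold Pre_overlap_filter; infer_instance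
def pvWitness_overlap_filter : (List (String × List String)) :=
  [("en", ["cat", "dog"]), ("fr", ["chat", "dog"])]
def Spec_overlap_filter (lang_dict : List (String × List String)) (out : List (String × List String)) : Prop := out = overlap_filter_alt lang_dict
instance (lang_dict : List (String × List String)) (out : List (String × List String)) : Decidable (Spec_overlap_filter lang_dict out) := by unfold Spec_overlap_filter; infer_instance

-- ===== CLAIM (what is proved, stated in full; the proofs are below) =====
def Claim_equal_overlap_filter : Prop := ∀ (lang_dict : List (String × List String)), Dom_overlap_filter lang_dict → Pre_overlap_filter lang_dict → Spec_overlap_filter lang_dict (overlap_filter lang_dict)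

-- ===== LEMMAS AND PROOFS =====

-- B's counting loop computes the total number of occurrences of w across all value lists.
lemma counts_getD (ld : List (String × List String)) (c : PySem.Dict String Int) (w : String) :
    (ld.foldl (fun c p => p.2.foldl (fun c w => c.modify w 0 (· + 1)) c) c).getD w 0
      = c.getD w 0 + ((ld.map (fun p => (p.2.count w : Int))).sum) := by
  induction ld generalizing c with
  | nil => simp
  | cons p t ih =>
      simp only [List.foldl_cons, List.map_cons, List.sum_cons]
      rw [ih, PySem.Dict.getD_foldl_modify_add_one]
      ring

-- A's inner loop is a filter: keep w iff no other key's list contains it.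
lemma diff_loop (d : PySem.Dict String (List String)) (L : String) :
    ∀ (ks : List String) (ws : List String),
    ks.foldl (fun no ol => if ol ≠ L then PySem.Set.diff no (d.getD ol []) else no) ws
      = ws.filter (fun w => ks.all (fun ol => ol == L || !(d.getD ol []).contains w)) := by
  intro ks
  induction ks with
  | nil => intro ws; simp
  | cons ol t ih =>
      intro ws
      simp only [List.foldl_cons]
      by_cases h : ol = L
      · subst h
        rw [if_neg (by simp), ih ws]
        apply List.filter_congr
        intro w _
        simp
      · rw [if_pos h, ih]
        simp only [PySem.Set.diff, List.filter_filter]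
        apply List.filter_congr
        intro w _
        have hol : (ol == L) = false := by simpa using h
        simp [hol, Bool.and_comm]

-- the pointwise agreement of the two filter predicates
lemma pred_eq (ld : List (String × List String))
    (hk : (ld.map Prod.fst).Nodup) (hv : ∀ q ∈ ld, q.2.Nodup)
    (p : String × List String) (hp : p ∈ ld) (w : String) (hw : w ∈ p.2) :
    (((ld.map (fun q => (q.2.count w : Int))).sum == 1))
      = ld.all (fun q => q.1 == p.1 || !q.2.contains w) := by
  obtain ⟨l1, l2, rfl⟩ := List.append_of_mem hp
  have hcp : p.2.count w = 1 := List.count_eq_one_of_mem (hv p (by simp)) hw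
  have hkey : ∀ q ∈ l1 ++ l2, q.1 ≠ p.1 := by
    have hk' : (l1.map Prod.fst ++ p.1 :: l2.map Prod.fst).Nodup := by simpa using hk
    intro q hq he
    rcases List.mem_append.1 hq with h1 | h2
    · exact (List.disjoint_of_nodup_append hk') (List.mem_map_of_mem (f := Prod.fst) h1)
        (by simp [he])
    · exact (List.nodup_cons.1 (List.nodup_append.1 hk').2.1).1
        (he ▸ List.mem_map_of_mem (f := Prod.fst) h2)
  have hcast : ((l1 ++ l2).map (fun q => (q.2.count w : Int))).sum
      = Nat.cast (((l1 ++ l2).map (fun q => q.2.count w)).sum) := by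
    rw [Nat.cast_list_sum, List.map_map]
    rfl
  have hsum : ((l1 ++ p :: l2).map (fun q => (q.2.count w : Int))).sum
      = ((l1 ++ l2).map (fun q => (q.2.count w : Int))).sum + 1 := by
    simp only [List.map_append, List.map_cons, List.sum_append, List.sum_cons, hcp]
    push_cast
    ring
  have hzero : (((l1 ++ l2).map (fun q => (q.2.count w : Int))).sum = 0) ↔ (∀ q ∈ l1 ++ l2, w ∉ q.2) := by
    rw [hcast, Nat.cast_eq_zero (R := Int), List.sum_eq_zero_iff]
    constructor
    · intro h q hq
      exact List.count_eq_zero.1 (h _ (List.mem_map_of_mem (f := fun q => q.2.count w) hq))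
    · intro h n hn
      obtain ⟨q, hq, rfl⟩ := List.mem_map.1 hn
      exact List.count_eq_zero.2 (h q hq)
  rw [hsum, Bool.eq_iff_iff]
  constructor
  · intro h
    have h' : ((l1 ++ l2).map (fun q => (q.2.count w : Int))).sum = 0 := by
      have := beq_iff_eq.1 h
      linarith
    have hno := hzero.1 h'
    simp only [List.all_eq_true]
    intro q hq
    rcases List.mem_append.1 hq with h1 | h2
    · simp [hno q (List.mem_append.2 (Or.inl h1))]
    · rcases List.mem_cons.1 h2 with rfl | h2
      · simp
      · simp [hno q (List.mem_append.2 (Or.inr h2))]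
  · intro hall
    have hno : ∀ q ∈ l1 ++ l2, w ∉ q.2 := by
      intro q hq
      have hq' : q ∈ l1 ++ p :: l2 := by
        rcases List.mem_append.1 hq with h1 | h2
        · exact List.mem_append.2 (Or.inl h1)
        · exact List.mem_append.2 (Or.inr (List.mem_cons_of_mem _ h2))
      have := (List.all_eq_true.1 hall) q hq'
      rcases Bool.or_eq_true_iff.1 this with h | h
      · exact absurd (beq_iff_eq.1 h) (hkey q hq)
      · intro hmem
        rw [Bool.not_eq_true'] at h
        simp [hmem] at h
    have h0 := hzero.2 hno
    rw [h0]
    simp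

-- ===== VERDICT (by name: the statement is the Claim_ definition above) =====
theorem overlap_filter_spec : Claim_equal_overlap_filter := by
  intro ld _ hpre
  obtain ⟨hk, hv⟩ := hpre
  unfold Spec_overlap_filter overlap_filter overlap_filter_alt
  -- A's result dict is built over the fresh distinct keys of ld, so it is a map over ld
  rw [PySem.Dict.items_foldl_insert_fresh _ _ _ _ (by intro a _; exact PySem.Dict.contains_empty _) hk]
  simp only [PySem.Dict.empty]
  apply List.map_congr_left
  intro p hp
  have hitems : (PySem.Dict.mk ld).items = ld := rfl
  rw [hitems] at *
  congr 1
  have hkeys : (PySem.Dict.mk ld).keys = ld.map Prod.fst := rfl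
  rw [diff_loop, hkeys]
  apply List.filter_congr
  intro w hw
  have hemp : (PySem.Dict.mk ([] : List (String × Int))).getD w 0 = 0 := rfl
  rw [counts_getD, hemp, zero_add, pred_eq ld hk hv p hp w hw, List.all_map]
  rw [Bool.eq_iff_iff]
  simp only [List.all_eq_true]
  have hval : ∀ q ∈ ld, (PySem.Dict.mk ld).getD q.1 [] = q.2 := fun q hq =>
    PySem.Dict.getD_of_mem_items _ (by simpa using hq) (by simpa [hkeys] using hk) _
  constructor
  · intro hall q hq
    have := hall q hq
    simpa [Function.comp, hval q hq] using this
  · intro hall q hq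
    have := hall q hq
    simpa [Function.comp, hval q hq] using this
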